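-- pv_equiv track=rewrite | github.com/PashaShahbazi/pasha_lexer | pasha_lexer.py | ritorno
-- ===== SOURCE A (Python) =====
-- def ritorno(lexim):
--     j = 0
--     state = 0
--     while True:
--         ch = lexim[j]
--         match state:
--             case 0:
--                 if ch == 'r':
--                     state = 1
--                     j += 1
--                 else:
--                     state = 8
--             case 1:
--                 if ch == 'i':
--                     state = 2
--                     j += 1
--                 else:
--                     state = 8
--             case 2:
--                 if ch == 't':
--                     state = 3
--                     j += 1
--                 else:
--                     state = 8
--             case 3:
--                 if ch == 'o':
--                     state = 4
--                     j += 1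
--                 else:
--                     state = 8
--             case 4:
--                 if ch == 'r':
--                     state = 5
--                     j += 1
--                 else:
--                     state = 8
--             case 5:
--                 if ch == 'n':
--                     state = 6
--                     j += 1
--                 else:
--                     state = 8
--             case 6:
--                 if ch == 'o':
--                     state = 7
--                     j += 1
--                 else:
--                     state = 8
--             case 7:
--                 if ch == '\n':
--                     return True, '<return>'
--                 else:
--                     state = 8
--             case 8:
--                 return False, None
-- ===== SOURCE B (Python) =====
-- def ritorno(lexim):
--     for i, expected in enumerate('ritorno\n'):
--         if lexim[i] != expected:
--             return False, None
--     return True, '<return>'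
-- ===== Notes on version B (the rewrite author's own statement) =====
-- stated objective: simpler
-- what changed: Replaces the hand-written 9-state DFA (explicit state variable and per-state case branches) with a single pattern-driven loop comparing lexim[i] against each character of the literal 'ritorno\n'.
import Mathlib
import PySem

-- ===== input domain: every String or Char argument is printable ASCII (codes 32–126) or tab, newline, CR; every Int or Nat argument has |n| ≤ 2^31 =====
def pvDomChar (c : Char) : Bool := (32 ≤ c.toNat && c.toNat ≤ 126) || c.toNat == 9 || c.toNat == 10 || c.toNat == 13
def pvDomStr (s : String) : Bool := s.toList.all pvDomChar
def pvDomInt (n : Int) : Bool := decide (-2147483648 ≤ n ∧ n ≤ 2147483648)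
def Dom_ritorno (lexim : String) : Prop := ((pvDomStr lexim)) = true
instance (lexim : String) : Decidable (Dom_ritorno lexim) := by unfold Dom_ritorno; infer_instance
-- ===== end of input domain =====

-- B replaces A's hand-written 9-state DFA with one pattern-driven comparison loop (objective: simpler).

-- ===== PORT A =====
-- A's while-True loop over (j, state); fuel only makes the recursion total (the loop
-- runs at most 9 iterations since 9 - state strictly decreases); fuel 10 is never exhausted.
def ritornoLoop : Nat → List Char → Nat → Nat → Bool × Option String
  | 0, _, _, _ => (false, none)
  | fuel + 1, cs, j, state =>
    match PySem.List.pyGet? cs (j : Int) with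
    | none => (false, none)   -- IndexError in Python; excluded by Pre_ritorno
    | some ch =>
      match state with
      | 0 => if ch = 'r' then ritornoLoop fuel cs (j + 1) 1 else ritornoLoop fuel cs j 8
      | 1 => if ch = 'i' then ritornoLoop fuel cs (j + 1) 2 else ritornoLoop fuel cs j 8
      | 2 => if ch = 't' then ritornoLoop fuel cs (j + 1) 3 else ritornoLoop fuel cs j 8
      | 3 => if ch = 'o' then ritornoLoop fuel cs (j + 1) 4 else ritornoLoop fuel cs j 8
      | 4 => if ch = 'r' then ritornoLoop fuel cs (j + 1) 5 else ritornoLoop fuel cs j 8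
      | 5 => if ch = 'n' then ritornoLoop fuel cs (j + 1) 6 else ritornoLoop fuel cs j 8
      | 6 => if ch = 'o' then ritornoLoop fuel cs (j + 1) 7 else ritornoLoop fuel cs j 8
      | 7 => if ch = '\n' then (true, some "<return>") else ritornoLoop fuel cs j 8
      | _ => (false, none)    -- case 8: return False, None

def ritorno (lexim : String) : Bool × Option String :=
  ritornoLoop 10 lexim.toList 0 0

-- ===== PORT B =====
-- B: for i, expected in enumerate('ritorno\n'): if lexim[i] != expected: return False, None
def ritornoAltLoop (cs : List Char) : List (Int × Char) → Bool × Option String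
  | [] => (true, some "<return>")
  | (i, expected) :: rest =>
    match PySem.List.pyGet? cs i with
    | none => (false, none)   -- IndexError in Python; excluded by Pre_ritorno
    | some c => if c ≠ expected then (false, none) else ritornoAltLoop cs rest

def ritorno_alt (lexim : String) : Bool × Option String :=
  ritornoAltLoop lexim.toList (PySem.List.enumerate "ritorno\n".toList 0)

-- ===== PRECONDITION & SPEC =====
-- Pre_ excludes exactly the inputs on which A raises IndexError: the proper prefixes of 'ritorno\n'.
def Pre_ritorno (lexim : String) : Prop :=
  ¬ (lexim.toList.length < 8 ∧ lexim.toList <+: "ritorno\n".toList)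
instance (lexim : String) : Decidable (Pre_ritorno lexim) := by unfold Pre_ritorno; infer_instance
def pvWitness_ritorno : String := "ritorno\n"

def Spec_ritorno (lexim : String) (out : Bool × Option String) : Prop := out = ritorno_alt lexim
instance (lexim : String) (out : Bool × Option String) : Decidable (Spec_ritorno lexim out) := by unfold Spec_ritorno; infer_instance

-- ===== CLAIM (what is proved, stated in full; the proofs are below) =====
def Claim_equal_ritorno : Prop := ∀ (lexim : String), Dom_ritorno lexim → Pre_ritorno lexim → Spec_ritorno lexim (ritorno lexim)

-- ===== LEMMAS AND PROOFS =====

set_option maxHeartbeats 1000000 in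
theorem ritorno_loops_eq (cs : List Char)
    (h : ¬ (cs.length < 8 ∧ cs <+: "ritorno\n".toList)) :
    ritornoLoop 10 cs 0 0 = ritornoAltLoop cs (PySem.List.enumerate "ritorno\n".toList 0) := by
  have he : PySem.List.enumerate "ritorno\n".toList 0 =
      [(0,'r'),(1,'i'),(2,'t'),(3,'o'),(4,'r'),(5,'n'),(6,'o'),(7,'\n')] := by decide
  rw [he]
  rcases cs with _ | ⟨c0, cs⟩
  · exact absurd (by decide) h
  by_cases h0 : c0 = 'r'
  case neg => simp [ritornoLoop, ritornoAltLoop, pysem, h0]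
  subst h0
  rcases cs with _ | ⟨c1, cs⟩
  · exact absurd (by decide) h
  by_cases h1 : c1 = 'i'
  case neg => simp [ritornoLoop, ritornoAltLoop, pysem, h1]
  subst h1
  rcases cs with _ | ⟨c2, cs⟩
  · exact absurd (by decide) h
  by_cases h2 : c2 = 't'
  case neg => simp [ritornoLoop, ritornoAltLoop, pysem, h2]
  subst h2
  rcases cs with _ | ⟨c3, cs⟩
  · exact absurd (by decide) h
  by_cases h3 : c3 = 'o'
  case neg => simp [ritornoLoop, ritornoAltLoop, pysem, h3]
  subst h3
  rcases cs with _ | ⟨c4, cs⟩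
  · exact absurd (by decide) h
  by_cases h4 : c4 = 'r'
  case neg => simp [ritornoLoop, ritornoAltLoop, pysem, h4]
  subst h4
  rcases cs with _ | ⟨c5, cs⟩
  · exact absurd (by decide) h
  by_cases h5 : c5 = 'n'
  case neg => simp [ritornoLoop, ritornoAltLoop, pysem, h5]
  subst h5
  rcases cs with _ | ⟨c6, cs⟩
  · exact absurd (by decide) h
  by_cases h6 : c6 = 'o'
  case neg => simp [ritornoLoop, ritornoAltLoop, pysem, h6]
  subst h6
  rcases cs with _ | ⟨c7, cs⟩
  · exact absurd (by decide) h
  by_cases h7 : c7 = '\n'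
  case neg => simp [ritornoLoop, ritornoAltLoop, pysem, h7]
  subst h7
  simp only [ritornoLoop, ritornoAltLoop, pysem]
  norm_num

-- ===== VERDICT (by name: the statement is the Claim_ definition above) =====
theorem ritorno_spec : Claim_equal_ritorno := by
  intro lexim _ hpre
  exact ritorno_loops_eq lexim.toList hpre
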